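-- pv_equiv track=rewrite | github.com/littlegou/PSCP2024 | O/OTPv2.py | eight
-- ===== SOURCE A (Python) =====
-- def eight(n):
--     """eight"""
--     lis = []
--     for i in range(10):
--         if n.count(str(i))>0:
--             lis.append(n.count(str(i)))
--     count2 = 0
--     count3 = 0
--     for i in lis:
--         if i ==3:
--             count3 += 1
--         elif i == 2:
--             count2 += 1
--     if count3 == 2 or count2==3:
--         return "Valid"
--     return "Invalid"
-- ===== SOURCE B (Python) =====
-- def eight(n):
--     """eight"""
--     def go(ds):
--         if not ds:
--             return (0, 0)
--         c = ds[0]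
--         rest = [x for x in ds if x != c]
--         k = len(ds) - len(rest)
--         r2, r3 = go(rest)
--         return (r2 + (k == 2), r3 + (k == 3))
--     r2, r3 = go([c for c in n if '0' <= c <= '9'])
--     return "Valid" if r3 == 2 or r2 == 3 else "Invalid"
-- ===== Notes on version B (the rewrite author's own statement) =====
-- stated objective: alternative
-- what changed: Replaces A's ten str.count scans plus an explicit 2/3 tally loop by a recursive partition: repeatedly take the first remaining digit, drop all its occurrences to measure its multiplicity, and recurse on the rest.
import Mathlib
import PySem

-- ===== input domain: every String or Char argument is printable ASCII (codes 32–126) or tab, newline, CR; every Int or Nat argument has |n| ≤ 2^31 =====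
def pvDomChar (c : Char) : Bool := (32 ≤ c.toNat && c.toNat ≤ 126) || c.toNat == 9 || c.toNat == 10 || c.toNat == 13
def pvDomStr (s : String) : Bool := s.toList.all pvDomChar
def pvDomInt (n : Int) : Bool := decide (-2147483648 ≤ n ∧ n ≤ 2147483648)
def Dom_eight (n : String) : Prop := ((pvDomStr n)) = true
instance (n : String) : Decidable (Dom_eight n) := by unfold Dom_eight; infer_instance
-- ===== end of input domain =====

-- B replaces A's ten str.count scans and explicit 2/3 tally loop by a recursive partition:
-- take the first remaining digit, drop all its occurrences to measure its multiplicity, recurse (alternative).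

-- ===== PORT A =====
def eight (n : String) : String :=
  let lis : List Int := (PySem.List.pyRange 0 10 1).foldl
    (fun lis i =>
      if PySem.Str.count n (PySem.Int.toStr i) > 0 then
        lis ++ [(PySem.Str.count n (PySem.Int.toStr i) : Int)]
      else lis) []
  let cc : Int × Int := lis.foldl
    (fun p i => if i == 3 then (p.1, p.2 + 1) else if i == 2 then (p.1 + 1, p.2) else p)
    (0, 0)  -- (count2, count3)
  if cc.2 == 2 || cc.1 == 3 then "Valid" else "Invalid"

-- ===== PORT B =====
-- '0' <= c <= '9' on one-character Python strings is exactly the Char order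
def isDig (c : Char) : Bool := decide ('0' ≤ c ∧ c ≤ '9')

-- the inner recursive helper go of Source B
def goB (ds : List Char) : Int × Int :=
  match ds with
  | [] => (0, 0)
  | c :: t =>
    let rest := (c :: t).filter (fun x => x ≠ c)
    let k : Int := ((c :: t).length : Int) - rest.length
    let p := goB rest
    (p.1 + (if k == 2 then 1 else 0), p.2 + (if k == 3 then 1 else 0))
termination_by ds.length
decreasing_by
  simp only [List.filter_cons, ne_eq, not_true_eq_false, decide_false, List.length_cons]
  exact Nat.lt_succ_of_le (List.length_filter_le _ _)

def eight_alt (n : String) : String :=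
  let p := goB (n.toList.filter isDig)
  if p.2 == 2 || p.1 == 3 then "Valid" else "Invalid"

-- ===== PRECONDITION & SPEC =====
def Spec_eight (n : String) (out : String) : Prop := out = eight_alt n
instance (n : String) (out : String) : Decidable (Spec_eight n out) := by unfold Spec_eight; infer_instance

-- ===== CLAIM (what is proved, stated in full; the proofs are below) =====
def Claim_equal_eight : Prop := ∀ (n : String), Dom_eight n → Spec_eight n (eight n)

-- ===== LEMMAS AND PROOFS =====

def digitsList : List Char := ['0','1','2','3','4','5','6','7','8','9']

theorem count_go_single (c : Char) (l : List Char) : ∀ (fuel acc : Nat), l.length ≤ fuel →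
    PySem.Chars.count.go [c] fuel l acc = acc + l.count c := by
  induction l with
  | nil => intro fuel acc _; cases fuel <;> simp [PySem.Chars.count.go]
  | cons h t ih =>
    intro fuel acc hle
    cases fuel with
    | zero => simp at hle
    | succ f =>
      simp only [PySem.Chars.count.go]
      by_cases hc : c = h
      · subst hc
        simp [List.isPrefixOf, ih f (acc + 1) (by simpa using hle)]
        omega
      · simp [List.isPrefixOf, hc, Ne.symm hc, ih f acc (by simpa using hle)]

theorem chars_count_single (l : List Char) (c : Char) :
    PySem.Chars.count l [c] = l.count c := by
  simp [PySem.Chars.count, count_go_single c l l.length 0 le_rfl]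

theorem str_count_digit (n : String) (i : Int) (c : Char)
    (h : (PySem.Int.toStr i).toList = [c]) :
    PySem.Str.count n (PySem.Int.toStr i) = n.toList.count c := by
  rw [PySem.Str.count_eq, h, chars_count_single]

-- A's second loop is a simultaneous tally of the 2s and 3s
theorem tally_eq (lis : List Int) : ∀ (a b : Int),
    lis.foldl (fun p i => if i == 3 then (p.1, p.2 + 1) else if i == 2 then (p.1 + 1, p.2) else p) (a, b)
      = (a + (lis.count 2 : Int), b + (lis.count 3 : Int)) := by
  induction lis with
  | nil => intro a b; simp
  | cons x t ih =>
    intro a b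
    by_cases h3 : x = 3
    · subst h3
      rw [List.foldl_cons]
      simp only [BEq.rfl, if_true, ih, List.count_cons]
      simp
      omega
    · by_cases h2 : x = 2
      · subst h2
        rw [List.foldl_cons]
        simp only [ih, List.count_cons]
        simp
        omega
      · rw [List.foldl_cons]
        simp only [show (x == (3:Int)) = false by simp [h3],
          show (x == (2:Int)) = false by simp [h2], Bool.false_eq_true, if_false]
        rw [ih]
        simp only [List.count_cons]
        refine Prod.ext ?_ ?_ <;> simp [h2, h3]

theorem mem_digitsList (c : Char) : c ∈ digitsList ↔ isDig c = true := by
  constructor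
  · intro hc; fin_cases hc <;> decide
  · intro hd
    obtain ⟨hlo, hhi⟩ : '0' ≤ c ∧ c ≤ '9' := of_decide_eq_true hd
    rw [Char.le_def] at hlo hhi
    have h1 : 48 ≤ c.toNat := UInt32.le_iff_toNat_le.1 hlo
    have h2 : c.toNat ≤ 57 := UInt32.le_iff_toNat_le.1 hhi
    have hofn : c = Char.ofNat c.toNat := by simp [Char.ofNat_toNat]
    interval_cases h : c.toNat <;> simp_all [digitsList]

-- counting distinct digit chars with a given positive multiplicity: over the distinct
-- elements of the filtered string, or over the ten digit characters — same count
theorem countP_set_eq_digits (fl : List Char) (hfl : ∀ c ∈ fl, isDig c = true)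
    (v : Int) (hv : 0 < v) :
    (PySem.Set.ofList fl).countP (fun c => (fl.count c : Int) == v)
      = digitsList.countP (fun c => (fl.count c : Int) == v) := by
  have hperm : ((PySem.Set.ofList fl).filter (fun c => (fl.count c : Int) == v)).Perm
      (digitsList.filter (fun c => (fl.count c : Int) == v)) := by
    rw [List.perm_ext_iff_of_nodup
      (List.Nodup.filter _ (PySem.Set.nodup_ofList fl))
      (List.Nodup.filter _ (by decide))]
    intro c
    simp only [List.mem_filter, PySem.Set.mem_ofList]
    constructor
    · rintro ⟨hm, hq⟩
      exact ⟨(mem_digitsList c).2 (hfl c hm), hq⟩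
    · rintro ⟨_, hq⟩
      have hcount : (fl.count c : Int) = v := by simpa using hq
      have hpos : 0 < fl.count c := by
        by_contra h
        simp only [Nat.pos_iff_ne_zero, ne_eq, not_not] at h
        rw [h] at hcount; simp at hcount; omega
      exact ⟨List.count_pos_iff.1 hpos, hq⟩
  simpa [List.countP_eq_length_filter] using hperm.length_eq

-- the common characterisation: A's first loop produces, for v ∈ {2,3}, the number of
-- digit characters occurring exactly v times in n
theorem eight_count_core (n : String) (v : Int) (hv : 0 < v) :
    (((PySem.List.pyRange 0 10 1).foldl
      (fun lis i =>
        if PySem.Str.count n (PySem.Int.toStr i) > 0 then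
          lis ++ [(PySem.Str.count n (PySem.Int.toStr i) : Int)]
        else lis) ([] : List Int)).count v : Nat)
      = (PySem.Set.ofList (n.toList.filter isDig)).countP
          (fun c => ((n.toList.filter isDig).count c : Int) == v) := by
  set l := n.toList with hl
  set fl := l.filter isDig with hfl
  have hfn : (fun (lis : List Int) i =>
        if PySem.Str.count n (PySem.Int.toStr i) > 0 then
          lis ++ [(PySem.Str.count n (PySem.Int.toStr i) : Int)]
        else lis)
      = (fun lis i =>
        if decide (PySem.Str.count n (PySem.Int.toStr i) > 0) = true then
          lis ++ [(PySem.Str.count n (PySem.Int.toStr i) : Int)]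
        else lis) := by
    funext lis i; simp
  rw [hfn, PySem.List.foldl_append_if (fun i => decide (PySem.Str.count n (PySem.Int.toStr i) > 0))
      (fun i => (PySem.Str.count n (PySem.Int.toStr i) : Int))]
  simp only [List.nil_append, List.count_eq_countP, List.countP_map, List.countP_filter]
  have hdrop : (PySem.List.pyRange 0 10 1).countP
      (fun i => ((PySem.Str.count n (PySem.Int.toStr i) : Int) == v) &&
                 decide (PySem.Str.count n (PySem.Int.toStr i) > 0))
      = (PySem.List.pyRange 0 10 1).countP
      (fun i => ((PySem.Str.count n (PySem.Int.toStr i) : Int) == v)) := by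
    apply List.countP_congr
    intro i _
    simp only [Bool.and_eq_true, beq_iff_eq, decide_eq_true_eq]
    constructor
    · rintro ⟨h, _⟩; exact h
    · intro h; exact ⟨h, by omega⟩
  simp only [Function.comp]
  rw [hdrop]
  have hrange :
      (PySem.List.pyRange 0 10 1).countP
        (fun i => ((PySem.Str.count n (PySem.Int.toStr i) : Int) == v))
      = digitsList.countP (fun c => ((l.count c : Int) == v)) := by
    have e0 := str_count_digit n 0 '0' (by decide)
    have e1 := str_count_digit n 1 '1' (by decide)
    have e2 := str_count_digit n 2 '2' (by decide)
    have e3 := str_count_digit n 3 '3' (by decide)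
    have e4 := str_count_digit n 4 '4' (by decide)
    have e5 := str_count_digit n 5 '5' (by decide)
    have e6 := str_count_digit n 6 '6' (by decide)
    have e7 := str_count_digit n 7 '7' (by decide)
    have e8 := str_count_digit n 8 '8' (by decide)
    have e9 := str_count_digit n 9 '9' (by decide)
    have hr : PySem.List.pyRange 0 10 1 = [0,1,2,3,4,5,6,7,8,9] := by decide
    rw [hr]
    simp only [digitsList, List.countP_cons, List.countP_nil, e0, e1, e2, e3, e4, e5, e6, e7, e8, e9, hl]
  rw [hrange]
  have hdig : digitsList.countP (fun c => ((l.count c : Int) == v))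
      = digitsList.countP (fun c => ((fl.count c : Int) == v)) := by
    apply List.countP_congr
    intro c hc
    rw [hfl, List.count_filter ((mem_digitsList c).1 hc)]
  rw [hdig]
  exact (countP_set_eq_digits fl (fun c hc => List.of_mem_filter hc) v hv).symm

-- B's recursion computes, over the distinct elements, the number with multiplicity 2 and 3
-- one partition step: splitting off all copies of the head adds one to the tally iff its
-- multiplicity is v, and the remaining distinct elements keep their multiplicities
theorem countP_cons_set (c : Char) (t : List Char) (v : Int) :
    ((PySem.Set.ofList (c :: t)).countP (fun x => ((c :: t).count x : Int) == v) : Int)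
      = ((PySem.Set.ofList ((c :: t).filter (fun x => x ≠ c))).countP
          (fun x => (((c :: t).filter (fun x => x ≠ c)).count x : Int) == v) : Int)
        + (if (((c :: t).length : Int) - ((c :: t).filter (fun x => x ≠ c)).length == v)
           then 1 else 0) := by
  set ds := c :: t with hds
  set rest := ds.filter (fun x => x ≠ c) with hrest
  have hcnot : c ∉ rest := by simp [hrest]
  have hk : ((ds.length : Int) - rest.length) = (ds.count c : Int) := by
    have hlen := List.length_eq_countP_add_countP (p := fun x => decide (x ≠ c)) (l := ds)
    have hpe : (fun a => decide ¬(decide (a ≠ c) = true)) = (fun x => x == c) := by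
      funext x
      by_cases h : x = c <;> simp [h]
    rw [hpe, ← List.count_eq_countP] at hlen
    have h1 : rest.length = ds.countP (fun x => decide (x ≠ c)) := by
      rw [hrest, ← List.countP_eq_length_filter]
    omega
  have hperm : (PySem.Set.ofList ds).Perm (c :: PySem.Set.ofList rest) := by
    rw [List.perm_ext_iff_of_nodup (PySem.Set.nodup_ofList ds)
      (List.nodup_cons.2 ⟨fun h => hcnot ((PySem.Set.mem_ofList rest c).1 h),
        PySem.Set.nodup_ofList rest⟩)]
    intro x
    simp only [PySem.Set.mem_ofList, List.mem_cons, hrest, List.mem_filter]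
    by_cases hx : x = c <;> simp [hx, hds]
  rw [hk, List.Perm.countP_eq _ hperm, List.countP_cons]
  have hrcount : (PySem.Set.ofList rest).countP (fun x => ((ds.count x : Int) == v))
      = (PySem.Set.ofList rest).countP (fun x => ((rest.count x : Int) == v)) := by
    apply List.countP_congr
    intro x hx
    have hxr : x ∈ rest := (PySem.Set.mem_ofList rest x).1 hx
    have hxc : x ≠ c := by
      rw [hrest] at hxr
      exact of_decide_eq_true (List.mem_filter.1 hxr).2
    rw [hrest, List.count_filter (by simpa using hxc)]
  rw [hrcount]
  by_cases hv : (ds.count c : Int) = v <;> simp [hv]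

theorem goB_eq (ds : List Char) :
    goB ds = (((PySem.Set.ofList ds).countP (fun x => (ds.count x : Int) == 2) : Int),
              ((PySem.Set.ofList ds).countP (fun x => (ds.count x : Int) == 3) : Int)) := by
  fun_induction goB ds with
  | case1 => simp [PySem.Set.ofList]
  | case2 c t rest k p ih =>
    simp only [p, k, rest] at ih ⊢
    rw [ih]
    refine Prod.ext ?_ ?_
    · exact (countP_cons_set c t 2).symm
    · exact (countP_cons_set c t 3).symm

-- ===== VERDICT (by name: the statement is the Claim_ definition above) =====
theorem eight_spec : Claim_equal_eight := by
  intro n _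
  unfold Spec_eight eight eight_alt
  simp only [tally_eq, goB_eq, eight_count_core n 2 (by omega), eight_count_core n 3 (by omega),
    zero_add]
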